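-- pv_equiv track=rewrite | github.com/uhoks-sonata/uhok-backend | services/homeshopping/utils/homeshopping_kok.py | _expand_variants
-- ===== SOURCE A (Python) =====
-- from typing import Dict, List, Tuple, Union, Set
--
-- def _expand_variants(core: List[str], variants: Dict[str, List[str]]) -> List[str]:
--     out: List[str] = []
--     seen = set()
--     for k in core:
--         if k not in seen:
--             out.append(k); seen.add(k)
--         for v in variants.get(k, []):
--             if v not in seen:
--                 out.append(v); seen.add(v)
--     return out
-- ===== SOURCE B (Python) =====
-- def _dedup(xs):
--     # repeated-filter dedup: take the head, drop every later copy of it, repeat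
--     out = []
--     while xs:
--         h = xs[0]
--         out.append(h)
--         xs = [x for x in xs[1:] if x != h]
--     return out
--
-- def _expand_variants(core, variants):
--     flat = []
--     for k in core:
--         flat.append(k)
--         flat.extend(variants.get(k, []))
--     return _dedup(flat)
-- ===== Notes on version B (the rewrite author's own statement) =====
-- stated objective: alternative
-- what changed: Replaces the fused single pass with a seen-set by two phases: flatten keys with their variants into one list, then deduplicate it by repeated filtering (take the head, delete all its later copies, recurse on the remainder) with no membership structure at all.
import Mathlib
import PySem

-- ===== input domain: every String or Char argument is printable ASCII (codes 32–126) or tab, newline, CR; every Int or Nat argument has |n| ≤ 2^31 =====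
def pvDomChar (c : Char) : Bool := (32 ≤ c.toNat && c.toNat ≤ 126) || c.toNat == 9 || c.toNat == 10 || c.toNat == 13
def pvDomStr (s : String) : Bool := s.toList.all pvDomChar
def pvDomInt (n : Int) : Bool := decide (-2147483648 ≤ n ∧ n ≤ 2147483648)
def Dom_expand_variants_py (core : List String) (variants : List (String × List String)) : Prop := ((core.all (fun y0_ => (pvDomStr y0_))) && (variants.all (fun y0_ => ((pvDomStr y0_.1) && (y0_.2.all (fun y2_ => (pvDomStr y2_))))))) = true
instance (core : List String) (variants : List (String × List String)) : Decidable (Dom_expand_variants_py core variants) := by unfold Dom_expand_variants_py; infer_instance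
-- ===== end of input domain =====

-- B replaces A's fused seen-set loop by two phases: flatten everything, then dedup by
-- repeatedly taking the head and filtering out its later copies (no membership structure).
-- ===== PORT A =====
-- 'if x not in seen: out.append(x); seen.add(x)' — the dedup step shared by both places in A's loop
def evStep (p : List String × PySem.Set String) (x : String) : List String × PySem.Set String :=
  if PySem.Set.contains p.2 x then p else (p.1 ++ [x], PySem.Set.add p.2 x)

def expand_variants_py (core : List String) (variants : List (String × List String)) : List String :=
  (core.foldl (fun p k =>
      ((PySem.Dict.mk variants).getD k []).foldl evStep (evStep p k))
    ([], PySem.Set.empty)).1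

-- ===== PORT B =====
-- Source B's _dedup: while xs: out.append(xs[0]); xs = [x for x in xs[1:] if x != xs[0]]
def evDedup (out : List String) (xs : List String) : List String :=
  match xs with
  | [] => out
  | h :: t => evDedup (out ++ [h]) (t.filter (fun x => x != h))
termination_by xs.length
decreasing_by
  have := List.length_filter_le (fun x => x != h) t
  simp; omega

def expand_variants_py_alt (core : List String) (variants : List (String × List String)) : List String :=
  evDedup []
    (core.foldl (fun flat k => (flat ++ [k]) ++ (PySem.Dict.mk variants).getD k []) [])

-- ===== PRECONDITION & SPEC =====
def Spec_expand_variants_py (core : List String) (variants : List (String × List String)) (out : List String) : Prop := out = expand_variants_py_alt core variants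
instance (core : List String) (variants : List (String × List String)) (out : List String) : Decidable (Spec_expand_variants_py core variants out) := by unfold Spec_expand_variants_py; infer_instance

-- ===== CLAIM (what is proved, stated in full; the proofs are below) =====
def Claim_equal_expand_variants_py : Prop := ∀ (core : List String) (variants : List (String × List String)), Dom_expand_variants_py core variants → Spec_expand_variants_py core variants (expand_variants_py core variants)

-- ===== LEMMAS AND PROOFS =====
-- A's state keeps out = seen (as lists); then evStep is Set.add on both components.
lemma evStep_diag (s : PySem.Set String) (x : String) :
    evStep (s, s) x = (PySem.Set.add s x, PySem.Set.add s x) := by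
  by_cases h : PySem.Set.contains s x <;>
    simp_all [evStep, PySem.Set.add, PySem.Set.contains]

lemma foldl_evStep_diag (xs : List String) (s : PySem.Set String) :
    xs.foldl evStep (s, s) = (xs.foldl PySem.Set.add s, xs.foldl PySem.Set.add s) := by
  induction xs generalizing s with
  | nil => rfl
  | cons x t ih => simp [List.foldl_cons, evStep_diag, ih]

-- folding Set.add into h :: s = prepend h after folding the h-free part into s
lemma foldl_add_cons (t : List String) (h : String) (s : List String) :
    t.foldl PySem.Set.add (h :: s)
      = h :: (t.filter (fun x => x != h)).foldl PySem.Set.add s := by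
  induction t generalizing s with
  | nil => rfl
  | cons x t ih =>
    by_cases hx : x = h
    · subst hx
      simp [List.foldl_cons, PySem.Set.add, PySem.Set.contains, ih]
    · have hb : (x == h) = false := beq_false_of_ne hx
      simp only [List.foldl_cons, List.filter_cons, hb, bne, Bool.not_false]
      rw [show PySem.Set.add (h :: s) x = h :: PySem.Set.add s x by
        simp [PySem.Set.add, PySem.Set.contains, hx]
        split <;> rfl]
      exact ih (PySem.Set.add s x)

-- B's repeated-filter dedup computes out ++ set(xs) (first occurrences, in order)
lemma foldl_flatMap {A B C : Type} (g : A -> List B) (f : C -> B -> C) (xs : List A) (init : C) :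
    (xs.flatMap g).foldl f init = xs.foldl (fun acc x => (g x).foldl f acc) init := by
  induction xs generalizing init with
  | nil => rfl
  | cons x t ih => simp [List.flatMap_cons, List.foldl_append, ih]

lemma evDedup_eq_ofList_aux (n : Nat) :
    ∀ (xs out : List String), xs.length ≤ n → evDedup out xs = out ++ PySem.Set.ofList xs := by
  induction n with
  | zero =>
      intro xs out hn
      match xs with
      | [] => simp [evDedup, PySem.Set.ofList]
      | h :: t => simp at hn
  | succ n ih =>
      intro xs out hn
      match xs with
      | [] => simp [evDedup, PySem.Set.ofList]
      | h :: t =>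
      have hlt : (t.filter (fun x => x != h)).length ≤ n := by
        have := List.length_filter_le (fun x => x != h) t
        simp at hn; omega
      rw [evDedup, ih _ _ hlt]
      have : PySem.Set.ofList (h :: t)
          = h :: PySem.Set.ofList (t.filter (fun x => x != h)) := by
        simp only [PySem.Set.ofList_eq_foldl, List.foldl_cons]
        exact foldl_add_cons t h []
      simp [this]

lemma evDedup_eq_ofList (out xs : List String) :
    evDedup out xs = out ++ PySem.Set.ofList xs :=
  evDedup_eq_ofList_aux xs.length xs out le_rfl

theorem expand_variants_py_spec : Claim_equal_expand_variants_py := by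
  intro core variants _
  unfold Spec_expand_variants_py expand_variants_py expand_variants_py_alt
  rw [evDedup_eq_ofList, List.nil_append, PySem.Set.ofList_eq_foldl]
  simp only [List.append_assoc]
  rw [PySem.List.foldl_append_eq_flatMap
      (g := fun k => [k] ++ (PySem.Dict.mk variants).getD k [])]
  simp only [List.nil_append]
  rw [foldl_flatMap]
  have h : ∀ (ks : List String) (s : PySem.Set String),
      ks.foldl (fun p k => ((PySem.Dict.mk variants).getD k []).foldl evStep (evStep p k)) (s, s)
        = (ks.foldl (fun acc k => ([k] ++ (PySem.Dict.mk variants).getD k []).foldl PySem.Set.add acc) s,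
           ks.foldl (fun acc k => ([k] ++ (PySem.Dict.mk variants).getD k []).foldl PySem.Set.add acc) s) := by
    intro ks
    induction ks with
    | nil => intro s; rfl
    | cons k t ih =>
      intro s
      simp only [List.foldl_cons, List.cons_append, List.nil_append, evStep_diag, foldl_evStep_diag, ih]
  exact congrArg Prod.fst (h core PySem.Set.empty)
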